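-- pv_equiv track=rewrite | github.com/Fxr-Whxt/Codewars | Python/Seven "ate" nine!.py | hungry_seven
-- ===== SOURCE A (Python) =====
-- def hungry_seven(arr):
--     i = 0
--     while i < len(arr) - 2:
--         if arr[i] == 7 and arr[i+1] == 8 and arr[i+2] == 9:
--             arr[i:i+3] = [8, 9, 7]
--             if i > 0:
--                 i -= 1
--         else:
--             i += 1
--     return arr
-- ===== SOURCE B (Python) =====
-- def hungry_seven(arr):
--     # Single left-to-right pass: hold pending 7s and let them slide over 8,9 pairs;
--     # stretches containing no 7 are located with list.index and copied wholesale.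
--     # Note: A mutates its argument in place; B builds a fresh list (return values agree).
--     out = []
--     n = len(arr)
--     pending = 0
--     i = 0
--     while i < n:
--         x = arr[i]
--         if x == 7:
--             pending += 1
--             i += 1
--         elif pending > 0 and x == 8 and i + 1 < n and arr[i + 1] == 9:
--             out.append(8)
--             out.append(9)
--             i += 2
--         else:
--             out.extend([7] * pending)
--             pending = 0
--             try:
--                 j = arr.index(7, i)
--             except ValueError:
--                 j = n
--             out.extend(arr[i:j])
--             i = j
--     out.extend([7] * pending)
--     return out
-- ===== Notes on version B (the rewrite author's own statement) =====
-- stated objective: faster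
-- what changed: Replaced the backtracking rewrite loop (re-splicing the list and stepping the index back after each 789->897 rewrite) by a single left-to-right pass that holds a count of pending 7s, lets them slide over 8,9 pairs, and copies 7-free stretches wholesale via list.index and slicing; B builds a new list instead of mutating the argument.
import Mathlib
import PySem

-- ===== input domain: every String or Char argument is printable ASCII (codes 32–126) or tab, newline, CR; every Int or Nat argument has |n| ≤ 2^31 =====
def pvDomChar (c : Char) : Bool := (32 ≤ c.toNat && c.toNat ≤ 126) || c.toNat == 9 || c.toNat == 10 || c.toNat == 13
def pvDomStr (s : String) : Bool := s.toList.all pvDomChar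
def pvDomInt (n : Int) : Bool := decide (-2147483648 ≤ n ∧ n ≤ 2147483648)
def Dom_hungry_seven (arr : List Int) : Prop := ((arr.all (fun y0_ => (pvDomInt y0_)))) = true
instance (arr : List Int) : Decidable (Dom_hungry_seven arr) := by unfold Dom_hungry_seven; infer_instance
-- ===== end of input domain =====

-- B replaces A's backtracking rewrite loop by one left-to-right pass holding pending 7s (measured faster);
-- A mutates its argument in place, B builds a fresh list — the theorem is about the return value.

-- ===== PORT A =====
-- Termination helpers for the port of A's while loop (cited by its decreasing_by).
-- pot l = Σ over positions j holding a 7 of (l.length - j); each 789→897 rewrite lowers it by 2.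
def pot : List Int → Nat
  | [] => 0
  | x :: xs => (if x = 7 then xs.length + 1 else 0) + pot xs

theorem pot_pat (v : List Int) : pot (7 :: 8 :: 9 :: v) = pot (8 :: 9 :: 7 :: v) + 2 := by
  simp [pot]; omega

theorem pot_append (t : List Int) : ∀ l1 l2 : List Int, l1.length = l2.length →
    pot l1 = pot l2 + 2 → pot (t ++ l1) = pot (t ++ l2) + 2 := by
  induction t with
  | nil => intro l1 l2 _ h; simpa using h
  | cons a t ih =>
      intro l1 l2 hl h
      simp only [List.cons_append, pot, List.length_append, hl, ih l1 l2 hl h]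
      omega

theorem decomp_pat (arr : List Int) (i : Nat) (h : i + 2 < arr.length)
    (h7 : arr[i]? = some 7) (h8 : arr[i+1]? = some 8) (h9 : arr[i+2]? = some 9) :
    arr = arr.take i ++ [7, 8, 9] ++ arr.drop (i + 3) := by
  have hi : i < arr.length := by omega
  have hi1 : i + 1 < arr.length := by omega
  have e1 : arr.drop i = 7 :: arr.drop (i+1) := by
    rw [List.drop_eq_getElem_cons hi]
    have : arr[i] = 7 := by
      have := List.getElem?_eq_getElem hi
      rw [this] at h7; exact Option.some.inj h7
    rw [this]
  have e2 : arr.drop (i+1) = 8 :: arr.drop (i+2) := by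
    rw [List.drop_eq_getElem_cons hi1]
    have : arr[i+1] = 8 := by
      have := List.getElem?_eq_getElem hi1
      rw [this] at h8; exact Option.some.inj h8
    rw [this]
  have e3 : arr.drop (i+2) = 9 :: arr.drop (i+3) := by
    rw [List.drop_eq_getElem_cons h]
    have : arr[i+2] = 9 := by
      have := List.getElem?_eq_getElem h
      rw [this] at h9; exact Option.some.inj h9
    rw [this]
  conv_lhs => rw [← List.take_append_drop i arr, e1, e2, e3]
  simp

theorem pot_rewrite (arr : List Int) (i : Nat) (h : i + 2 < arr.length)
    (h7 : arr[i]? = some 7) (h8 : arr[i+1]? = some 8) (h9 : arr[i+2]? = some 9) :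
    pot arr = pot (arr.take i ++ [8, 9, 7] ++ arr.drop (i + 3)) + 2 := by
  conv_lhs => rw [decomp_pat arr i h h7 h8 h9]
  rw [List.append_assoc, List.append_assoc]
  exact pot_append _ _ _ (by simp) (pot_pat _)

-- A's while loop: i starts at 0 and is only decremented when positive, so it stays a Nat;
-- Python's `if i > 0: i -= 1` is Nat subtraction `i - 1`; `arr[i:i+3] = [8,9,7]` is
-- take i ++ [8,9,7] ++ drop (i+3).
def loopA (arr : List Int) (i : Nat) : List Int :=
  if h : i + 2 < arr.length then
    if hp : arr[i]? = some 7 ∧ arr[i+1]? = some 8 ∧ arr[i+2]? = some 9 then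
      loopA (arr.take i ++ [8, 9, 7] ++ arr.drop (i + 3)) (i - 1)
    else loopA arr (i + 1)
  else arr
termination_by 3 * pot arr + (arr.length - i)
decreasing_by
  · have hpot := pot_rewrite arr i h hp.1 hp.2.1 hp.2.2
    have hlen : (arr.take i ++ [8, 9, 7] ++ arr.drop (i + 3)).length = arr.length := by
      simp; omega
    rw [hlen]; omega
  · omega

def hungry_seven (arr : List Int) : List Int := loopA arr 0

-- ===== PORT B =====
-- B's single pass: out = accumulated output, p = count of pending 7s not yet placed;
-- a 7-free stretch is located with findIdx (Python's arr.index(7, i) with ValueError -> n)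
-- and copied wholesale (Python's out.extend(arr[i:j])).
def goB (out : List Int) (p : Nat) (l : List Int) : List Int :=
  match l with
  | [] => out ++ List.replicate p 7
  | x :: rest =>
    if x = 7 then goB out (p + 1) rest
    else if 0 < p ∧ x = 8 ∧ rest.head? = some 9 then goB (out ++ [8, 9]) p rest.tail
    else
      goB (out ++ List.replicate p 7 ++ (x :: rest).take ((x :: rest).findIdx (· = 7))) 0
        ((x :: rest).drop ((x :: rest).findIdx (· = 7)))
termination_by l.length
decreasing_by
  · simp
  · cases rest <;> simp
  · rename_i h _
    have : ((x :: rest).findIdx (· = 7)) = rest.findIdx (· = 7) + 1 := by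
      simp [List.findIdx_cons, h]
    simp [this]

def hungry_seven_alt (arr : List Int) : List Int := goB [] 0 arr

-- ===== PRECONDITION & SPEC =====
def Spec_hungry_seven (arr : List Int) (out : List Int) : Prop := out = hungry_seven_alt arr
instance (arr : List Int) (out : List Int) : Decidable (Spec_hungry_seven arr out) := by unfold Spec_hungry_seven; infer_instance

-- ===== CLAIM (what is proved, stated in full; the proofs are below) =====
def Claim_equal_hungry_seven : Prop := ∀ (arr : List Int), Dom_hungry_seven arr → Spec_hungry_seven arr (hungry_seven arr)

-- ===== LEMMAS AND PROOFS =====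

-- Non-accumulator version of B's pass, for the proofs.
def go (p : Nat) (l : List Int) : List Int :=
  match l with
  | [] => List.replicate p 7
  | x :: rest =>
    if x = 7 then go (p + 1) rest
    else if 0 < p ∧ x = 8 ∧ rest.head? = some 9 then 8 :: 9 :: go p rest.tail
    else List.replicate p 7 ++ x :: go 0 rest
termination_by l.length
decreasing_by
  · simp
  · cases rest <;> simp
  · simp

-- go 0 passes a 7-free prefix through unchanged
theorem go_skip : ∀ l : List Int,
    go 0 l = l.take (l.findIdx (· = 7)) ++ go 0 (l.drop (l.findIdx (· = 7))) := by
  intro l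
  induction l with
  | nil => simp
  | cons x rest ih =>
      by_cases h7 : x = 7
      · subst h7; simp [List.findIdx_cons]
      · have hj : ((x :: rest).findIdx (· = 7)) = rest.findIdx (· = 7) + 1 := by
          simp [List.findIdx_cons, h7]
        rw [hj, List.take_succ_cons, List.drop_succ_cons]
        rw [show go 0 (x :: rest) = x :: go 0 rest by
          rw [go]; simp [h7]]
        rw [ih]
        simp

theorem goB_eq (out : List Int) (p : Nat) (l : List Int) :
    goB out p l = out ++ go p l := by
  induction out, p, l using goB.induct with
  | case1 out p => simp [goB, go]
  | case2 out p rest ih => simp only [goB, go]; exact ih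
  | case3 out p x rest h h2 ih =>
      rw [goB, go, if_neg h, if_neg h, if_pos h2, if_pos h2, ih]
      simp
  | case4 out p x rest h h2 ih =>
      rw [goB, go, if_neg h, if_neg h, if_neg h2, if_neg h2, ih]
      rw [show List.replicate p (7:Int) ++ x :: go 0 rest
            = List.replicate p (7:Int) ++ go 0 (x :: rest) by
          rw [show go 0 (x :: rest) = x :: go 0 rest by rw [go]; simp [h]]]
      rw [go_skip (x :: rest)]
      simp

-- "contains no 7,8,9 pattern"
def NoPat (l : List Int) : Prop := ∀ t v : List Int, l ≠ t ++ 7 :: 8 :: 9 :: v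

theorem nopat_of_forall (l : List Int)
    (h : ∀ j : Nat, ¬(l[j]? = some 7 ∧ l[j+1]? = some 8 ∧ l[j+2]? = some 9)) : NoPat l := by
  intro t v e
  apply h t.length
  subst e
  refine ⟨?_, ?_, ?_⟩ <;>
    · rw [List.getElem?_append_right (by omega)]
      simp

theorem go_nopat : ∀ (l : List Int) (p : Nat), NoPat (List.replicate p 7 ++ l) →
    go p l = List.replicate p 7 ++ l := by
  intro l
  induction l with
  | nil => intro p _; simp [go]
  | cons x rest ih =>
      intro p h
      by_cases h7 : x = 7
      · subst h7
        have e : List.replicate p (7:Int) ++ 7 :: rest = List.replicate (p+1) 7 ++ rest := by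
          rw [List.replicate_succ']; simp
        rw [go, if_pos rfl, ih (p+1) (by rw [← e]; exact h), ← e]
      · rw [go, if_neg h7]
        by_cases h2 : 0 < p ∧ x = 8 ∧ rest.head? = some 9
        · exfalso
          obtain ⟨hp, rfl, h9⟩ := h2
          cases rest with
          | nil => simp at h9
          | cons y rest' =>
              simp at h9; subst h9
              exact h (List.replicate (p-1) 7) rest'
                (by rw [show p = (p-1) + 1 by omega, List.replicate_succ']; simp)
        · rw [if_neg h2, ih 0 ?_]
          · simp
          · intro t v e
            have e' : rest = t ++ 7 :: 8 :: 9 :: v := by simpa using e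
            exact h (List.replicate p 7 ++ x :: t) v (by simp [e'])

-- the 789→897 rewrite anywhere in the list does not change B's pass
theorem go_rw_nil (p : Nat) (v : List Int) :
    go p (7 :: 8 :: 9 :: v) = go p (8 :: 9 :: 7 :: v) := by
  rw [show go p (7 :: 8 :: 9 :: v) = go (p+1) (8 :: 9 :: v) by rw [go]; simp]
  rw [show go (p+1) (8 :: 9 :: v) = 8 :: 9 :: go (p+1) v by rw [go]; simp]
  by_cases hp : 0 < p
  · rw [show go p (8 :: 9 :: 7 :: v) = 8 :: 9 :: go p (7 :: v) by rw [go]; simp [hp]]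
    rw [show go p (7 :: v) = go (p+1) v by rw [go]; simp]
  · have hp0 : p = 0 := by omega
    subst hp0
    rw [show go 0 (8 :: 9 :: 7 :: v) = List.replicate 0 (7:Int) ++ 8 :: go 0 (9 :: 7 :: v) by
      rw [go]; simp]
    rw [show go 0 (9 :: 7 :: v) = List.replicate 0 (7:Int) ++ 9 :: go 0 (7 :: v) by
      rw [go]; simp]
    rw [show go 0 (7 :: v) = go 1 v by rw [go]; simp]
    simp

theorem go_rw_aux : ∀ (n : Nat) (u : List Int), u.length ≤ n → ∀ (p : Nat) (v : List Int),
    go p (u ++ 7 :: 8 :: 9 :: v) = go p (u ++ 8 :: 9 :: 7 :: v) := by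
  intro n
  induction n with
  | zero =>
      intro u hu p v
      have : u = [] := List.eq_nil_of_length_eq_zero (by omega)
      subst this
      simpa using go_rw_nil p v
  | succ n ih =>
      intro u hu p v
      cases u with
      | nil => simpa using go_rw_nil p v
      | cons a u =>
          have hu' : u.length ≤ n := by simpa using hu
          rw [List.cons_append, List.cons_append, go, go]
          have hhead : ((u ++ 7 :: 8 :: 9 :: v).head? = some 9) ↔
              ((u ++ 8 :: 9 :: 7 :: v).head? = some 9) := by
            cases u <;> simp
          by_cases h7 : a = 7
          · rw [if_pos h7, if_pos h7, ih u hu']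
          · rw [if_neg h7, if_neg h7]
            by_cases h2 : 0 < p ∧ a = 8 ∧ (u ++ 7 :: 8 :: 9 :: v).head? = some 9
            · have h2' : 0 < p ∧ a = 8 ∧ (u ++ 8 :: 9 :: 7 :: v).head? = some 9 :=
                ⟨h2.1, h2.2.1, hhead.mp h2.2.2⟩
              rw [if_pos h2, if_pos h2']
              cases u with
              | nil => simp at h2
              | cons b u' =>
                  have hb : u'.length ≤ n := by
                    simp at hu'; omega
                  simp only [List.cons_append, List.tail_cons]
                  rw [ih u' hb]
            · have h2' : ¬(0 < p ∧ a = 8 ∧ (u ++ 8 :: 9 :: 7 :: v).head? = some 9) := by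
                intro hc; exact h2 ⟨hc.1, hc.2.1, hhead.mpr hc.2.2⟩
              rw [if_neg h2, if_neg h2', ih u hu']

theorem go_rw (u : List Int) (p : Nat) (v : List Int) :
    go p (u ++ 7 :: 8 :: 9 :: v) = go p (u ++ 8 :: 9 :: 7 :: v) :=
  go_rw_aux u.length u le_rfl p v

-- invariant: no pattern starts strictly before i
theorem loopA_eq_go (arr : List Int) (i : Nat)
    (inv : ∀ j : Nat, j < i → ¬(arr[j]? = some 7 ∧ arr[j+1]? = some 8 ∧ arr[j+2]? = some 9)) :
    loopA arr i = go 0 arr := by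
  induction arr, i using loopA.induct with
  | case1 arr i h hp ih =>
      obtain ⟨h7, h8, h9⟩ := hp
      rw [loopA]
      rw [dif_pos h, dif_pos ⟨h7, h8, h9⟩]
      have hd := decomp_pat arr i h h7 h8 h9
      set arr' := arr.take i ++ [8, 9, 7] ++ arr.drop (i + 3) with harr'
      have hpre : ∀ k, k < i → arr'[k]? = arr[k]? := by
        intro k hk
        rw [harr', List.append_assoc, List.getElem?_append_left
          (by simp [List.length_take]; omega), List.getElem?_take_of_lt hk]
      have hati : arr'[i]? = some 8 := by
        have hlt : (arr.take i).length = i := by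
          simp [List.length_take]; omega
        rw [harr', List.append_assoc, List.getElem?_append_right (by omega : (arr.take i).length ≤ i),
          hlt]
        simp
      have inv' : ∀ j : Nat, j < i - 1 →
          ¬(arr'[j]? = some 7 ∧ arr'[j+1]? = some 8 ∧ arr'[j+2]? = some 9) := by
        intro j hj hc
        by_cases he : j + 2 < i
        · exact inv j (by omega) ⟨by rw [← hpre j (by omega)]; exact hc.1,
            by rw [← hpre (j+1) (by omega)]; exact hc.2.1,
            by rw [← hpre (j+2) he]; exact hc.2.2⟩
        · have : j + 2 = i := by omega
          rw [this, hati] at hc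
          exact absurd hc.2.2 (by simp)
      rw [ih inv']
      have : go 0 arr = go 0 arr' := by
        conv_lhs => rw [hd]
        rw [harr', List.append_assoc, List.append_assoc]
        exact go_rw _ 0 _
      rw [this]
  | case2 arr i h hp ih =>
      rw [loopA, dif_pos h, dif_neg hp]
      apply ih
      intro j hj
      by_cases hji : j < i
      · exact inv j hji
      · have : j = i := by omega
        subst this; exact hp
  | case3 arr i h =>
      rw [loopA, dif_neg h]
      have hnp : NoPat arr := by
        apply nopat_of_forall
        intro j hc
        have hlen : j + 2 < arr.length :=
          (List.getElem?_eq_some_iff.mp hc.2.2).1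
        exact inv j (by omega) hc
      have := go_nopat arr 0 (by simpa using hnp)
      simpa using this.symm

-- ===== VERDICT (by name: the statement is the Claim_ definition above) =====
theorem hungry_seven_spec : Claim_equal_hungry_seven := by
  intro arr _
  unfold Spec_hungry_seven hungry_seven hungry_seven_alt
  rw [loopA_eq_go arr 0 (by intro j hj; omega), goB_eq]
  simp
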